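-- pv_equiv track=rewrite | github.com/saleisha57/DesktopClean2 | AlgHW/ALGHW.py | graphTr
-- ===== SOURCE A (Python) =====
-- from collections import deque
--
-- def BFS(v,g,number, vertex,r):
-- 	q = deque()
-- 	q.append(v[number])
-- 	while len(q) != 0:
-- 		for i in range(number,len(g)):
-- 			if g[number][i] == 1 and vertex[i] == False:
-- 				q.append(i)
-- 				r.append(i)
-- 				vertex[i] = True
-- 		q.popleft()
--
-- def graphTr(graph,vertex):
-- 	results = []
-- 	count = 0
-- 	for x in range(0,len(graph)):
-- 		if vertex[x] == False:
-- 			results.append(x)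
-- 			BFS(graph[x],graph,x,vertex,results)
-- 	return results
-- ===== SOURCE B (Python) =====
-- def graphTr(graph, vertex):
--     results = []
--     n = len(graph)
--     for x in range(n):
--         if not vertex[x]:
--             hits = [i for i in range(x, n) if graph[x][i] == 1 and not vertex[i]]
--             results.append(x)
--             results.extend(hits)
--             for i in hits:
--                 vertex[i] = True
--     return results
-- ===== Notes on version B (the rewrite author's own statement) =====
-- stated objective: simpler
-- what changed: Drops the deque-based BFS helper and its queue-draining while/popleft loop entirely, replacing them with one inline nested scan that collects each row's unvisited neighbours with a comprehension and marks them.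
-- outside the precondition, e.g. on graphTr([[1, 1], []], [False, False]): A returns [0, 0, 1], B returns [0, 0, 1]
import Mathlib
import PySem

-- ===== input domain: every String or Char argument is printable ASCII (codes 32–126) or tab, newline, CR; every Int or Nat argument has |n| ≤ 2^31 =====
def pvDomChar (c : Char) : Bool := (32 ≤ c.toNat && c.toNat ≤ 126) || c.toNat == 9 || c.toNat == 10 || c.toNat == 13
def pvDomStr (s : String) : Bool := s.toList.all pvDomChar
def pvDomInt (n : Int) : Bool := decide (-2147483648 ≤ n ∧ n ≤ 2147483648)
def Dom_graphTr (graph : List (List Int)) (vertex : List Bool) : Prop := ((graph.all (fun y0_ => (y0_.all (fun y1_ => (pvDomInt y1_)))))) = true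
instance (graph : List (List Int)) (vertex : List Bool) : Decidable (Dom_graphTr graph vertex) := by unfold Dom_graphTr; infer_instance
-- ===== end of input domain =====

-- B inlines the traversal: no deque, no while/popleft draining loop — one nested scan (objective: simpler).
-- Both Pythons mutate `vertex` in place identically on Pre_; the theorems here are about the return value.

-- ===== PORT A =====
-- total reads standing for Python's indexing (in bounds on every access A performs inside Pre_)
def pvRow (g : List (List Int)) (x : Nat) : List Int := g.getD x []
def pvCell (row : List Int) (i : Nat) : Int := row.getD i 0
def pvV (v : List Bool) (i : Nat) : Bool := v.getD i false

-- the `for i in range(number, len(g))` body of BFS, threading (q, r, vertex)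
def pvInnerA (row : List Int) (i k : Nat) (q r : List Int) (v : List Bool) :
    List Int × List Int × List Bool :=
  match k with
  | 0 => (q, r, v)
  | k+1 =>
    if pvCell row i == 1 && !(pvV v i) then
      pvInnerA row (i+1) k (q ++ [(i : Int)]) (r ++ [(i : Int)]) (v.set i true)
    else
      pvInnerA row (i+1) k q r v

-- the `while len(q) != 0` loop; fuel only makes it total in Lean (never exhausted inside Pre_)
def pvBfsLoop (row : List Int) (x n fuel : Nat) (q r : List Int) (v : List Bool) :
    List Int × List Bool :=
  match fuel with
  | 0 => (r, v)
  | fuel+1 =>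
    if q.isEmpty then (r, v)
    else
      let s := pvInnerA row x (n - x) q r v
      pvBfsLoop row x n fuel (s.1.drop 1) s.2.1 s.2.2

-- BFS(v0, g, x, vertex, r): q starts holding v0[x]
def pvBFS (v0 : List Int) (g : List (List Int)) (x : Nat) (v : List Bool) (r : List Int) :
    List Int × List Bool :=
  pvBfsLoop (pvRow g x) x g.length (g.length + 1) [pvCell v0 x] r v

-- the `for x in range(0, len(graph))` loop of graphTr
def pvGoA (g : List (List Int)) (k x : Nat) (v : List Bool) (r : List Int) : List Int :=
  match k with
  | 0 => r
  | k+1 =>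
    if pvV v x == false then
      let s := pvBFS (pvRow g x) g x v (r ++ [(x : Int)])
      pvGoA g k (x+1) s.2 s.1
    else
      pvGoA g k (x+1) v r

def graphTr (graph : List (List Int)) (vertex : List Bool) : List Int :=
  pvGoA graph graph.length 0 vertex []

-- ===== PORT B =====
-- the comprehension [i for i in range(x, n) if graph[x][i] == 1 and not vertex[i]]
def pvHits (row : List Int) (v : List Bool) (i k : Nat) : List Nat :=
  match k with
  | 0 => []
  | k+1 =>
    if pvCell row i == 1 && !(pvV v i) then i :: pvHits row v (i+1) k
    else pvHits row v (i+1) k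

-- `for i in hits: vertex[i] = True`
def pvMark (v : List Bool) (l : List Nat) : List Bool :=
  l.foldl (fun v i => v.set i true) v

def pvGoB (g : List (List Int)) (k x : Nat) (v : List Bool) (r : List Int) : List Int :=
  match k with
  | 0 => r
  | k+1 =>
    if pvV v x then pvGoB g k (x+1) v r
    else
      let hits := pvHits (pvRow g x) v x (g.length - x)
      pvGoB g k (x+1) (pvMark v hits) ((r ++ [(x : Int)]) ++ hits.map Int.ofNat)

def graphTr_alt (graph : List (List Int)) (vertex : List Bool) : List Int :=
  pvGoB graph graph.length 0 vertex []

-- ===== PRECONDITION & SPEC =====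
-- Pre_ excludes ragged/short inputs on which A's vertex[x] / graph[x][i] indexing raises
-- IndexError; on the few such inputs where the offending row is never reached A still
-- returns, and B returns the same value there (see cites).
def Pre_graphTr (graph : List (List Int)) (vertex : List Bool) : Prop :=
  graph.length ≤ vertex.length ∧
    ∀ x ∈ List.range graph.length,
      vertex.getD x false = false → graph.length ≤ (graph.getD x []).length

instance (graph : List (List Int)) (vertex : List Bool) : Decidable (Pre_graphTr graph vertex) := by
  unfold Pre_graphTr; infer_instance

def pvWitness_graphTr : List (List Int) × List Bool := ([[1, 1], [0, 1]], [false, false])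

def Spec_graphTr (graph : List (List Int)) (vertex : List Bool) (out : List Int) : Prop := out = graphTr_alt graph vertex
instance (graph : List (List Int)) (vertex : List Bool) (out : List Int) : Decidable (Spec_graphTr graph vertex out) := by unfold Spec_graphTr; infer_instance

-- ===== CLAIM (what is proved, stated in full; the proofs are below) =====
def Claim_equal_graphTr : Prop := ∀ (graph : List (List Int)) (vertex : List Bool), Dom_graphTr graph vertex → Pre_graphTr graph vertex → Spec_graphTr graph vertex (graphTr graph vertex)

-- ===== LEMMAS AND PROOFS =====

lemma pvV_set_ne {v : List Bool} {a j : Nat} (h : a ≠ j) : pvV (v.set a true) j = pvV v j := by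
  simp [pvV, List.getD, List.getElem?_set_ne h]

lemma pvV_set_true_of_true {v : List Bool} {a j : Nat} (h : pvV v j = true) :
    pvV (v.set a true) j = true := by
  by_cases hm : a = j
  · subst hm
    have hl : a < v.length := by
      by_contra hl
      simp [pvV, List.getD, List.getElem?_eq_none (by omega : v.length ≤ a)] at h
    simp [pvV, List.getD, List.getElem?_set_self hl]
  · rwa [pvV_set_ne hm]

lemma pvMark_true_of_true {l : List Nat} {v : List Bool} {j : Nat} (h : pvV v j = true) :
    pvV (pvMark v l) j = true := by
  induction l generalizing v with
  | nil => simpa [pvMark]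
  | cons a l ih => exact ih (pvV_set_true_of_true h)

lemma pvMark_length (l : List Nat) (v : List Bool) : (pvMark v l).length = v.length := by
  induction l generalizing v with
  | nil => rfl
  | cons a l ih => simp [pvMark, List.foldl] at ih ⊢; rw [ih, List.length_set]

lemma pvMark_mem {l : List Nat} {v : List Bool} {j : Nat} (h : j ∈ l) (hj : j < v.length) :
    pvV (pvMark v l) j = true := by
  induction l generalizing v with
  | nil => simp at h
  | cons a l ih =>
    show pvV (pvMark (v.set a true) l) j = true
    rcases List.mem_cons.1 h with rfl | h
    · exact pvMark_true_of_true (by simp [pvV, List.getD, List.getElem?_set_self hj])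
    · exact ih h (by simpa using hj)

lemma pvHits_set_high {row : List Int} {v : List Bool} {a i k : Nat} (h : a < i) :
    pvHits row (v.set a true) i k = pvHits row v i k := by
  induction k generalizing i with
  | zero => rfl
  | succ k ih =>
    simp only [pvHits, pvV_set_ne (by omega : a ≠ i), ih (by omega : a < i + 1)]

lemma pvHits_length_le (row : List Int) (v : List Bool) (i k : Nat) :
    (pvHits row v i k).length ≤ k := by
  induction k generalizing i with
  | zero => simp [pvHits]
  | succ k ih =>
    simp only [pvHits]
    split
    · simpa using ih (i + 1)
    · exact le_trans (ih (i + 1)) (by omega)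

lemma pvHits_mem_of {row : List Int} {v : List Bool} {i k j : Nat}
    (h1 : i ≤ j) (h2 : j < i + k) (hc : pvCell row j == 1) (hv : pvV v j = false) :
    j ∈ pvHits row v i k := by
  induction k generalizing i with
  | zero => omega
  | succ k ih =>
    simp only [pvHits]
    by_cases hj : i = j
    · subst hj; simp [hc, hv]
    · have hm : j ∈ pvHits row v (i + 1) k := ih (by omega) (by omega)
      split <;> simp [hm]

lemma pvHits_nil_of_marked {row : List Int} {v : List Bool} {i k : Nat}
    (h : ∀ j, i ≤ j → j < i + k → pvCell row j == 1 → pvV v j = true) :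
    pvHits row v i k = [] := by
  induction k generalizing i with
  | zero => rfl
  | succ k ih =>
    simp only [pvHits]
    have : ¬ (pvCell row i == 1 && !(pvV v i)) = true := by
      by_cases hc : pvCell row i == 1
      · simp [hc, h i le_rfl (by omega) hc]
      · simp [hc]
    rw [if_neg this]
    exact ih fun j hj1 hj2 hc => h j (by omega) (by omega) hc

lemma pvInnerA_eq (row : List Int) (i k : Nat) (q r : List Int) (v : List Bool) :
    pvInnerA row i k q r v =
      (q ++ (pvHits row v i k).map Int.ofNat,
       r ++ (pvHits row v i k).map Int.ofNat,
       pvMark v (pvHits row v i k)) := by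
  induction k generalizing i q r v with
  | zero => simp [pvInnerA, pvHits, pvMark]
  | succ k ih =>
    simp only [pvInnerA, pvHits]
    split
    · rw [ih, pvHits_set_high (by omega : i < i + 1)]
      simp [pvMark]
    · rw [ih]

lemma marked_after {row : List Int} {v : List Bool} {i k : Nat} (hlen : i + k ≤ v.length) :
    ∀ j, i ≤ j → j < i + k → pvCell row j == 1 →
      pvV (pvMark v (pvHits row v i k)) j = true := by
  intro j h1 h2 hc
  by_cases hv : pvV v j = true
  · exact pvMark_true_of_true hv
  · exact pvMark_mem (pvHits_mem_of h1 h2 hc (by simpa using hv)) (by omega)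

lemma pvBfsLoop_drain {row : List Int} {x n : Nat} {v : List Bool} {r : List Int}
    (hnil : pvHits row v x (n - x) = []) :
    ∀ fuel (q : List Int), q.length ≤ fuel → pvBfsLoop row x n fuel q r v = (r, v) := by
  intro fuel
  induction fuel with
  | zero => intro q hq; rfl
  | succ fuel ih =>
    intro q hq
    simp only [pvBfsLoop]
    by_cases he : q.isEmpty
    · rw [if_pos he]
    · rw [if_neg he]
      have hqne : q ≠ [] := by simpa [List.isEmpty_iff] using he
      rw [pvInnerA_eq, hnil]
      simp only [List.map_nil, List.append_nil]
      exact ih (q.drop 1) (by simp; omega)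

lemma pvBFS_eq (v0 : List Int) (g : List (List Int)) (x : Nat) (v : List Bool) (r : List Int)
    (hx : x ≤ g.length) (hv : g.length ≤ v.length) :
    pvBFS v0 g x v r =
      (r ++ (pvHits (pvRow g x) v x (g.length - x)).map Int.ofNat,
       pvMark v (pvHits (pvRow g x) v x (g.length - x))) := by
  unfold pvBFS
  simp only [pvBfsLoop, List.isEmpty_cons, if_neg Bool.false_ne_true, pvInnerA_eq]
  have hlen : x + (g.length - x) ≤ v.length := by omega
  have hnil : pvHits (pvRow g x) (pvMark v (pvHits (pvRow g x) v x (g.length - x))) x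
      (g.length - x) = [] :=
    pvHits_nil_of_marked (marked_after hlen)
  rw [show ((([pvCell v0 x] ++ (pvHits (pvRow g x) v x (g.length - x)).map Int.ofNat),
      (r ++ (pvHits (pvRow g x) v x (g.length - x)).map Int.ofNat),
      (pvMark v (pvHits (pvRow g x) v x (g.length - x)))) : List Int × List Int × List Bool).1.drop 1
      = (pvHits (pvRow g x) v x (g.length - x)).map Int.ofNat by simp]
  exact pvBfsLoop_drain hnil _ _ (by simpa using le_trans (pvHits_length_le _ _ _ _) (by omega))

lemma pvGo_eq (g : List (List Int)) : ∀ (k x : Nat) (v : List Bool) (r : List Int),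
    x + k = g.length → g.length ≤ v.length → pvGoA g k x v r = pvGoB g k x v r := by
  intro k
  induction k with
  | zero => intro x v r _ _; rfl
  | succ k ih =>
    intro x v r hk hv
    simp only [pvGoA, pvGoB]
    by_cases h : pvV v x
    · simp only [h, if_pos]
      rw [if_neg (by simp_all)]
      exact ih (x+1) v r (by omega) hv
    · have h' : pvV v x = false := by simpa using h
      rw [if_pos (by simp [h']), if_neg (by simp [h'])]
      rw [pvBFS_eq _ _ _ _ _ (by omega) hv]
      exact ih (x+1) _ _ (by omega) (by rw [pvMark_length]; exact hv)

-- ===== VERDICT (by name: the statement is the Claim_ definition above) =====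
theorem graphTr_spec : Claim_equal_graphTr := by
  intro graph vertex _ hpre
  unfold Spec_graphTr graphTr graphTr_alt
  exact pvGo_eq graph graph.length 0 vertex [] (by omega) hpre.1
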